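-- pv_equiv track=rewrite | github.com/bchwast/AGH-WDI | Ćwiczenia 3/ex_07.py | check
-- ===== SOURCE A (Python) =====
-- def ser_a(n):
--     return n*n+n+1
--
-- def check(a):
--     i = 1
--     while a >= ser_a(i):
--         k = 1
--         while a >= k*ser_a(i):
--             if a%(k*ser_a(i)) == 0: return True
--             else: k += 1
--         i += 1
--     return False
-- ===== SOURCE B (Python) =====
-- def check(a):
--     # Same predicate: is a divisible by some i*i+i+1 <= a?  Single O(sqrt(a)) loop,
--     # no inner k-scan (k*s | a already implies s | a, so the k loop was redundant).
--     i = 1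
--     while True:
--         s = i * i + i + 1
--         if s > a:
--             return False
--         if a % s == 0:
--             return True
--         i += 1
-- ===== Notes on version B (the rewrite author's own statement) =====
-- stated objective: faster
-- what changed: Dropped the redundant inner k-loop (k*s dividing a already implies s divides a), leaving a single loop that tests a % (i*i+i+1) == 0 for i up to sqrt(a).
import Mathlib
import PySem

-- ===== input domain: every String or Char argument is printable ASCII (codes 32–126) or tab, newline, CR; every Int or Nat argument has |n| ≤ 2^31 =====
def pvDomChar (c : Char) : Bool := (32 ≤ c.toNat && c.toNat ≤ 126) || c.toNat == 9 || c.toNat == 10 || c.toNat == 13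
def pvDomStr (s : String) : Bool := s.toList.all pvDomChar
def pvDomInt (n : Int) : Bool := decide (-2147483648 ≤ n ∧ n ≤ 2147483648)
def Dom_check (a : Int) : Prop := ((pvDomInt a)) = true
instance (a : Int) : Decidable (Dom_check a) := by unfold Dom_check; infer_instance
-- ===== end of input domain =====

-- B drops A's redundant inner k-loop: a % (k*s) == 0 already implies a % s == 0, so one
-- O(√a) scan over i with test a % (i²+i+1) == 0 returns the same Bool.  Objective: faster.

-- ===== PORT A =====
def serA (n : Int) : Int := n*n + n + 1

-- inner 'while a >= k*ser_a(i)' loop of A; the '3 ≤ s ∧ 1 ≤ k' conjuncts are loop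
-- invariants of A (s = ser_a(i) with i ≥ 1, k starts at 1) added only for termination.
def checkInner (a s k : Int) : Bool :=
  if _h : k * s ≤ a ∧ 3 ≤ s ∧ 1 ≤ k then
    if PySem.Int.mod a (k * s) = 0 then true else checkInner a s (k + 1)
  else false
termination_by (a - k).toNat
decreasing_by
  obtain ⟨h1, h2, h3⟩ := _h
  have : k * 3 ≤ k * s := by
    apply mul_le_mul_of_nonneg_left h2; omega
  omega

-- outer 'while a >= ser_a(i)' loop of A; '1 ≤ i' is A's loop invariant, for termination.
def checkOuter (a i : Int) : Bool :=
  if _h : serA i ≤ a ∧ 1 ≤ i then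
    if checkInner a (serA i) 1 then true else checkOuter a (i + 1)
  else false
termination_by (a - i).toNat
decreasing_by
  obtain ⟨h1, h2⟩ := _h
  have : i * 1 ≤ i * i := by
    apply mul_le_mul_of_nonneg_left h2; omega
  simp [serA] at h1; omega

def check (a : Int) : Bool := checkOuter a 1

-- ===== PORT B =====
-- Source B's single 'while True' loop; '1 ≤ i' is the loop invariant, for termination.
def checkAltLoop (a i : Int) : Bool :=
  if _h : i*i + i + 1 ≤ a ∧ 1 ≤ i then
    if PySem.Int.mod a (i*i + i + 1) = 0 then true else checkAltLoop a (i + 1)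
  else false
termination_by (a - i).toNat
decreasing_by
  obtain ⟨h1, h2⟩ := _h
  have : i * 1 ≤ i * i := by
    apply mul_le_mul_of_nonneg_left h2; omega
  omega

def check_alt (a : Int) : Bool := checkAltLoop a 1

-- ===== PRECONDITION & SPEC =====
def Spec_check (a : Int) (out : Bool) : Prop := out = check_alt a
instance (a : Int) (out : Bool) : Decidable (Spec_check a out) := by unfold Spec_check; infer_instance

-- ===== CLAIM (what is proved, stated in full; the proofs are below) =====
def Claim_equal_check : Prop := ∀ (a : Int), Dom_check a → Spec_check a (check a)

-- ===== LEMMAS AND PROOFS =====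

-- If s ∤ a then no k*s divides a, so A's inner loop returns false.
theorem checkInner_false (a s : Int) (hnd : PySem.Int.mod a s ≠ 0) :
    ∀ k, checkInner a s k = false := by
  intro k
  unfold checkInner
  split
  · rename_i h
    obtain ⟨h1, h2, h3⟩ := h
    have hne : PySem.Int.mod a (k * s) ≠ 0 := by
      intro hz
      apply hnd
      rw [PySem.Int.mod_eq_zero_iff_dvd] at hz ⊢
      exact dvd_trans ⟨k, mul_comm k s⟩ hz
    rw [if_neg hne]
    exact checkInner_false a s hnd (k + 1)
  · rfl
termination_by k => (a - k).toNat
decreasing_by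
  rename_i h _
  obtain ⟨h1, h2, h3⟩ := h
  have : k * 3 ≤ k * s := by
    apply mul_le_mul_of_nonneg_left h2; omega
  omega

-- If s ∣ a (and the loop is entered) the very first k = 1 fires.
theorem checkInner_true (a s : Int) (hs : 3 ≤ s) (hle : s ≤ a)
    (hd : PySem.Int.mod a s = 0) : checkInner a s 1 = true := by
  unfold checkInner
  rw [dif_pos ⟨by omega, hs, le_refl 1⟩, one_mul, if_pos hd]

theorem outer_eq_alt (a i : Int) (hi : 1 ≤ i) : checkOuter a i = checkAltLoop a i := by
  unfold checkOuter checkAltLoop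
  have hser : serA i = i*i + i + 1 := rfl
  by_cases hg : i*i + i + 1 ≤ a
  · rw [dif_pos (by rw [hser]; exact ⟨hg, hi⟩), dif_pos ⟨hg, hi⟩]
    have hs3 : 3 ≤ serA i := by
      have : i * 1 ≤ i * i := by apply mul_le_mul_of_nonneg_left hi; omega
      simp [serA]; omega
    by_cases hd : PySem.Int.mod a (i*i + i + 1) = 0
    · rw [if_pos hd, checkInner_true a (serA i) hs3 (by rw [hser]; exact hg) (by rw [hser]; exact hd)]
      simp
    · rw [if_neg hd, checkInner_false a (serA i) (by rw [hser]; exact hd)]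
      simp only [Bool.false_eq_true, if_false]
      exact outer_eq_alt a (i + 1) (by omega)
  · rw [dif_neg (by rw [hser]; tauto), dif_neg (by tauto)]
termination_by (a - i).toNat
decreasing_by
  have : i * 1 ≤ i * i := by apply mul_le_mul_of_nonneg_left hi; omega
  omega

-- ===== VERDICT (by name: the statement is the Claim_ definition above) =====
theorem check_spec : Claim_equal_check := by
  intro a _
  unfold Spec_check check check_alt
  exact outer_eq_alt a 1 le_rfl
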